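-- pv_equiv track=rewrite | github.com/bwhiting2356/survey_results | scrape.py | assign_modes
-- ===== SOURCE A (Python) =====
-- import copy
--
-- def assign_modes(modes_default, modes_list):
--     new_modes = copy.copy(modes_default)
--     base_mode = "Regular modes of transportation: "
--     for mode in modes_list:
--         mode = mode.strip().lower()
--         if mode == "walk":
--             new_modes[base_mode + "Walk"] = 1
--         if mode == "bike" or mode == "bicycle":
--             new_modes[base_mode+ "Bike"] = 1
--         if mode == "taxi" or mode == "uber":
--             new_modes[base_mode + "Taxi/Uber"] = 1
--         if mode == "subway/light rail":
--             new_modes[base_mode + "Subway/Light Rail"] = 1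
--         if mode == "car":
--             new_modes[base_mode + "Car"] =  1
--         if mode == "bus":
--             new_modes[base_mode + "Bus"] = 1
--     return new_modes
-- ===== SOURCE B (Python) =====
-- def assign_modes(modes_default, modes_list):
--     base = "Regular modes of transportation: "
--     table = {"walk": "Walk", "bike": "Bike", "bicycle": "Bike",
--              "taxi": "Taxi/Uber", "uber": "Taxi/Uber",
--              "subway/light rail": "Subway/Light Rail",
--              "car": "Car", "bus": "Bus"}
--     suffixes = [table.get(m.strip().lower()) for m in modes_list]
--     triggered = list(dict.fromkeys(base + s for s in suffixes if s is not None))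
--     kept = [(k, 1 if k in triggered else v) for k, v in modes_default.items()]
--     added = [(k, 1) for k in triggered if k not in modes_default]
--     return dict(kept + added)
-- ===== Notes on version B (the rewrite author's own statement) =====
-- stated objective: alternative
-- what changed: Instead of sequentially mutating a copied dict inside the loop, B first collects the triggered display keys, ordered-dedups them with dict.fromkeys, and then constructs the result non-mutatingly as the updated default entries followed by the fresh keys in first-trigger order.
import Mathlib
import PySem

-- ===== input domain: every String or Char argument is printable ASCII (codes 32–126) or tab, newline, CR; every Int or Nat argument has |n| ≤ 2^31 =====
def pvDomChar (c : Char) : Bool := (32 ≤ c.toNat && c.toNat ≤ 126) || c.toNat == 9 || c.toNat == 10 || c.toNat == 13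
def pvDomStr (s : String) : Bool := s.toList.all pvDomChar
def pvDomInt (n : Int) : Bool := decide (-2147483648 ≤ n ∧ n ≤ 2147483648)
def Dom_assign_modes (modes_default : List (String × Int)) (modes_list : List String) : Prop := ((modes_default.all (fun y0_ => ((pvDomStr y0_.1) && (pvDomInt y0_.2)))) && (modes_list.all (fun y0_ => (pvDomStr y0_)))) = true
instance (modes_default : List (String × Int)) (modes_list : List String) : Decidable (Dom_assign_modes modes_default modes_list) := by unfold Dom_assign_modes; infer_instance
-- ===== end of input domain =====

-- B replaces A's sequential dict mutation by a non-mutating characterisation of the result: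
-- collect the triggered keys, dedup them, then build the output as updated defaults ++ fresh keys (alternative; return value only).

-- ===== PORT A =====
def amBase : String := "Regular modes of transportation: "

def amStepA (d : PySem.Dict String Int) (mode : String) : PySem.Dict String Int :=
  let m := PySem.Str.lower (PySem.Str.strip mode)
  let d := if m == "walk" then d.insert (amBase ++ "Walk") 1 else d
  let d := if m == "bike" || m == "bicycle" then d.insert (amBase ++ "Bike") 1 else d
  let d := if m == "taxi" || m == "uber" then d.insert (amBase ++ "Taxi/Uber") 1 else d
  let d := if m == "subway/light rail" then d.insert (amBase ++ "Subway/Light Rail") 1 else d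
  let d := if m == "car" then d.insert (amBase ++ "Car") 1 else d
  let d := if m == "bus" then d.insert (amBase ++ "Bus") 1 else d
  d

def assign_modes (modes_default : List (String × Int)) (modes_list : List String) : List (String × Int) :=
  (modes_list.foldl amStepA (PySem.Dict.ofList modes_default)).items

-- ===== PORT B =====
def amTable : PySem.Dict String String :=
  PySem.Dict.ofList [("walk", "Walk"), ("bike", "Bike"), ("bicycle", "Bike"),
    ("taxi", "Taxi/Uber"), ("uber", "Taxi/Uber"),
    ("subway/light rail", "Subway/Light Rail"), ("car", "Car"), ("bus", "Bus")]

def assign_modes_alt (modes_default : List (String × Int)) (modes_list : List String) : List (String × Int) :=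
  let suffixes := modes_list.map (fun m => amTable.get? (PySem.Str.lower (PySem.Str.strip m)))
  let triggered := PySem.List.dedup (suffixes.filterMap (fun o => o.map (fun s => "Regular modes of transportation: " ++ s)))
  let d := PySem.Dict.ofList modes_default
  let kept := d.items.map (fun p => (p.1, if p.1 ∈ triggered then (1 : Int) else p.2))
  let added := (triggered.filter (fun k => !(d.contains k))).map (fun k => (k, (1 : Int)))
  (PySem.Dict.ofList (kept ++ added)).items

-- ===== PRECONDITION & SPEC =====
def Spec_assign_modes (modes_default : List (String × Int)) (modes_list : List String) (out : List (String × Int)) : Prop := out = assign_modes_alt modes_default modes_list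
instance (modes_default : List (String × Int)) (modes_list : List String) (out : List (String × Int)) : Decidable (Spec_assign_modes modes_default modes_list out) := by unfold Spec_assign_modes; infer_instance

-- ===== CLAIM (what is proved, stated in full; the proofs are below) =====
def Claim_equal_assign_modes : Prop := ∀ (modes_default : List (String × Int)) (modes_list : List String), Dom_assign_modes modes_default modes_list → Spec_assign_modes modes_default modes_list (assign_modes modes_default modes_list)

-- ===== LEMMAS AND PROOFS =====

-- the key (if any) that one iteration of A's loop sets to 1
def amKeyOf (mode : String) : Option String :=
  (amTable.get? (PySem.Str.lower (PySem.Str.strip mode))).map (fun s => "Regular modes of transportation: " ++ s)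

set_option maxHeartbeats 1000000 in
theorem amStepA_eq_keyOf (d : PySem.Dict String Int) (mode : String) :
    amStepA d mode = match amKeyOf mode with
      | some k => d.insert k 1
      | none => d := by
  by_cases h1 : PySem.Str.lower (PySem.Str.strip mode) = "walk"
  · simp [amStepA, amKeyOf, amBase, h1, show amTable.get? "walk" = some "Walk" from rfl]
  · by_cases h2 : PySem.Str.lower (PySem.Str.strip mode) = "bike"
    · simp [amStepA, amKeyOf, amBase, h2, show amTable.get? "bike" = some "Bike" from rfl]
    · by_cases h3 : PySem.Str.lower (PySem.Str.strip mode) = "bicycle"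
      · simp [amStepA, amKeyOf, amBase, h3, show amTable.get? "bicycle" = some "Bike" from rfl]
      · by_cases h4 : PySem.Str.lower (PySem.Str.strip mode) = "taxi"
        · simp [amStepA, amKeyOf, amBase, h4, show amTable.get? "taxi" = some "Taxi/Uber" from rfl]
        · by_cases h5 : PySem.Str.lower (PySem.Str.strip mode) = "uber"
          · simp [amStepA, amKeyOf, amBase, h5, show amTable.get? "uber" = some "Taxi/Uber" from rfl]
          · by_cases h6 : PySem.Str.lower (PySem.Str.strip mode) = "subway/light rail"
            · simp [amStepA, amKeyOf, amBase, h6, show amTable.get? "subway/light rail" = some "Subway/Light Rail" from rfl]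
            · by_cases h7 : PySem.Str.lower (PySem.Str.strip mode) = "car"
              · simp [amStepA, amKeyOf, amBase, h7, show amTable.get? "car" = some "Car" from rfl]
              · by_cases h8 : PySem.Str.lower (PySem.Str.strip mode) = "bus"
                · simp [amStepA, amKeyOf, amBase, h8, show amTable.get? "bus" = some "Bus" from rfl]
                · have hnone : amTable.get? (PySem.Str.lower (PySem.Str.strip mode)) = none := by
                    have hitems : amTable.items = [("walk", "Walk"), ("bike", "Bike"),
                        ("bicycle", "Bike"), ("taxi", "Taxi/Uber"), ("uber", "Taxi/Uber"),
                        ("subway/light rail", "Subway/Light Rail"), ("car", "Car"), ("bus", "Bus")] := rfl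
                    simp [PySem.Dict.get?, hitems, List.find?,
                      beq_eq_false_iff_ne.mpr (Ne.symm h1), beq_eq_false_iff_ne.mpr (Ne.symm h2),
                      beq_eq_false_iff_ne.mpr (Ne.symm h3), beq_eq_false_iff_ne.mpr (Ne.symm h4),
                      beq_eq_false_iff_ne.mpr (Ne.symm h5), beq_eq_false_iff_ne.mpr (Ne.symm h6),
                      beq_eq_false_iff_ne.mpr (Ne.symm h7), beq_eq_false_iff_ne.mpr (Ne.symm h8)]
                  simp [amStepA, amKeyOf, hnone, h1, h2, h3, h4, h5, h6, h7, h8]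

set_option maxHeartbeats 1000000 in
-- A's loop is the plain insert loop over the list of triggered keys
theorem foldl_amStepA_eq (ml : List String) (d : PySem.Dict String Int) :
    ml.foldl amStepA d
      = (ml.filterMap amKeyOf).foldl (fun d k => d.insert k (1 : Int)) d := by
  induction ml generalizing d with
  | nil => simp
  | cons m ml ih =>
    cases hk : amKeyOf m with
    | none =>
      have hs : amStepA d m = d := by rw [amStepA_eq_keyOf, hk]
      rw [List.foldl_cons, hs, List.filterMap_cons, hk]
      exact ih d
    | some k =>
      have hs : amStepA d m = d.insert k 1 := by rw [amStepA_eq_keyOf, hk]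
      rw [List.foldl_cons, hs, List.filterMap_cons, hk, List.foldl_cons]
      exact ih (d.insert k 1)

-- closed form of an insert-1 loop: update the existing entries in place, then append
-- the fresh keys in order of first occurrence
theorem foldl_insert_one_items (ks : List String) (d : PySem.Dict String Int)
    (hnd : d.keys.Nodup) :
    (ks.foldl (fun d k => d.insert k (1 : Int)) d).items
      = d.items.map (fun p => (p.1, if p.1 ∈ ks then (1 : Int) else p.2))
        ++ ((PySem.List.dedup ks).filter (fun k => !(d.contains k))).map (fun k => (k, (1 : Int))) := by
  induction ks generalizing d with
  | nil => simp
  | cons k ks ih =>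
    have hstep := ih (d.insert k 1) (PySem.Dict.nodup_keys_insert d k 1 hnd)
    have hfilt : List.filter (fun j => !((d.insert k 1).contains j)) (PySem.Set.ofList ks)
        = List.filter (fun j => !(d.contains j)) (PySem.Set.discard (PySem.Set.ofList ks) k) := by
      simp only [PySem.Set.discard, List.filter_filter]
      apply List.filter_congr
      intro j _
      rw [PySem.Dict.contains_insert]
      by_cases hj : j = k <;> simp [hj, Bool.and_comm]
    by_cases hc : d.contains k = true
    · rw [List.foldl_cons, hstep, PySem.Dict.items_insert_of_contains d 1 hc, List.map_map]
      simp only [PySem.List.dedup_eq_ofList, PySem.Set.ofList_cons, List.filter_cons, hc,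
        Bool.not_true]
      rw [hfilt]
      congr 1
      apply List.map_congr_left
      intro p _
      by_cases hp : p.1 = k
      · simp [Function.comp, hp]
      · simp [Function.comp, hp]
    · have hc' : d.contains k = false := by simpa using hc
      rw [List.foldl_cons, hstep, PySem.Dict.items_insert_of_not_contains d 1 hc',
        List.map_append]
      have hkey : ∀ p ∈ d.items, p.1 ≠ k := by
        intro p hp hpk
        have hm := PySem.Dict.mem_keys_of_mem_items d hp
        rw [hpk] at hm
        rw [PySem.Dict.contains_eq_decide_mem_keys] at hc'
        simp [hm] at hc'
      have hmap : d.items.map (fun p => (p.1, if p.1 ∈ ks then (1 : Int) else p.2))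
          = d.items.map (fun p => (p.1, if p.1 ∈ k :: ks then (1 : Int) else p.2)) := by
        apply List.map_congr_left
        intro p hp
        simp [List.mem_cons, hkey p hp]
      rw [hmap]
      simp only [PySem.List.dedup_eq_ofList, PySem.Set.ofList_cons, List.filter_cons, hc',
        Bool.not_false, reduceIte]
      rw [hfilt]
      simp

-- dict() of a list whose keys are distinct is that list
theorem items_ofList_of_nodup (l : List (String × Int)) (h : (l.map Prod.fst).Nodup) :
    (PySem.Dict.ofList l).items = l := by
  have := PySem.Dict.items_foldl_insert_fresh l Prod.fst Prod.snd PySem.Dict.empty (by simp) h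
  simpa [PySem.Dict.ofList, PySem.Dict.update] using this

-- proof-only abbreviations for the pieces of B's computation
def amHits (ml : List String) : List String :=
  (ml.map (fun m => amTable.get? (PySem.Str.lower (PySem.Str.strip m)))).filterMap
    (fun o => o.map (fun s => "Regular modes of transportation: " ++ s))

def amKept (md : List (String × Int)) (ml : List String) : List (String × Int) :=
  (PySem.Dict.ofList md).items.map
    (fun p => (p.1, if p.1 ∈ PySem.List.dedup (amHits ml) then (1 : Int) else p.2))

def amAdded (md : List (String × Int)) (ml : List String) : List (String × Int) :=
  ((PySem.List.dedup (amHits ml)).filter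
      (fun k => !((PySem.Dict.ofList md).contains k))).map (fun k => (k, (1 : Int)))

theorem amHits_eq (ml : List String) : ml.filterMap amKeyOf = amHits ml := by
  rw [amHits, List.filterMap_map]
  have hfun : ((fun o : Option String => o.map fun s => "Regular modes of transportation: " ++ s) ∘
      fun m => amTable.get? (PySem.Str.lower (PySem.Str.strip m))) = amKeyOf :=
    funext fun m => by simp only [Function.comp_def, amKeyOf]
  rw [hfun]

theorem amKeys_nodup (md : List (String × Int)) (ml : List String) :
    ((amKept md ml ++ amAdded md ml).map Prod.fst).Nodup := by
  have hnd : (PySem.Dict.ofList md).keys.Nodup := PySem.Dict.nodup_keys_ofList md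
  have hkeysK : (amKept md ml).map Prod.fst = (PySem.Dict.ofList md).keys := by
    rw [amKept, List.map_map]
    simp only [PySem.Dict.keys, Function.comp_def]
  have hkeysA : (amAdded md ml).map Prod.fst
      = (PySem.List.dedup (amHits ml)).filter (fun k => !((PySem.Dict.ofList md).contains k)) := by
    rw [amAdded, List.map_map]
    simp [Function.comp_def]
  rw [List.map_append, List.nodup_append]
  refine ⟨by rw [hkeysK]; exact hnd, ?_, ?_⟩
  · rw [hkeysA]
    exact List.Nodup.filter _
      (by rw [PySem.List.dedup_eq_ofList]; exact PySem.Set.nodup_ofList (amHits ml))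
  · intro a ha b hb hab
    rw [hkeysK] at ha
    rw [hkeysA] at hb
    have hbc : (PySem.Dict.ofList md).contains b = false := by
      have := (List.mem_filter.mp hb).2
      simpa using this
    rw [← hab, PySem.Dict.contains_eq_decide_mem_keys] at hbc
    simp [ha] at hbc

theorem alt_eq_kept_added (md : List (String × Int)) (ml : List String) :
    assign_modes_alt md ml = amKept md ml ++ amAdded md ml := by
  have h : assign_modes_alt md ml
      = (PySem.Dict.ofList (amKept md ml ++ amAdded md ml)).items := by
    simp only [assign_modes_alt, amKept, amAdded, amHits]
    rfl
  rw [h, items_ofList_of_nodup _ (amKeys_nodup md ml)]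

set_option maxHeartbeats 1000000 in
-- ===== VERDICT (by name: the statement is the Claim_ definition above) =====
theorem assign_modes_spec : Claim_equal_assign_modes := by
  intro md ml _
  unfold Spec_assign_modes
  rw [alt_eq_kept_added]
  show (ml.foldl amStepA (PySem.Dict.ofList md)).items = _
  rw [foldl_amStepA_eq, amHits_eq,
    foldl_insert_one_items (amHits ml) (PySem.Dict.ofList md) (PySem.Dict.nodup_keys_ofList md)]
  have hmem : (PySem.Dict.ofList md).items.map
        (fun p => (p.1, if p.1 ∈ amHits ml then (1 : Int) else p.2)) = amKept md ml := by
    rw [amKept]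
    apply List.map_congr_left
    intro p _
    simp
  rw [hmem, amKept, amAdded]
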